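-- pv_equiv track=rewrite | github.com/bluecatlabs/gateway-workflows | Community/role_management/common/common.py | get_reverse_net_and_name
-- ===== SOURCE A (Python) =====
-- def get_reverse_net_and_name(address_part, subnet):
--     result = []
--     address_part = address_part.split('.', 4)
--     p1 = address_part[0]
--     p2 = address_part[1]
--     p3 = address_part[2]
--     p4 = address_part[3]
--     if subnet <= 8:
--         reverse_net = '{}.in-addr.arpa'.format(p1)
--         name = '{}.{}.{}'.format(p4, p3, p2)
--     elif subnet <= 16:
--         reverse_net = '{}.{}.in-addr.arpa'.format(p2, p1)
--         name = '{}.{}'.format(p4, p3)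
--     elif subnet <= 24:
--         reverse_net = '{}.{}.{}.in-addr.arpa'.format(p3, p2, p1)
--         name = p4
--     else:
--         reverse_net = '{}.{}.{}.{}.in-addr.arpa'.format(p4, p3, p2, p1)
--         name = ''
--
--     if divmod(subnet, 8)[1] == 0:
--         return [{'reverse_net': reverse_net, 'name': name}]
--     zone_number = 128
--     number_of_div = 1
--     for i in range(1, divmod(subnet, 8)[1]):
--         if number_of_div != divmod(subnet, 8)[1]:
--             number_of_div += 1
--             zone_number = int(zone_number / 2)
--
--     for i in range(zone_number):
--         zone_index = int(reverse_net.split('.', 1)[0]) + i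
--         result.append({'reverse_net': '{}.{}'.format(zone_index, reverse_net.split('.', 1)[1]), 'name': name})
--     return result
-- ===== SOURCE B (Python) =====
-- def get_reverse_net_and_name(address_part, subnet):
--     rest = address_part.split('.', 4)[:4]
--     net = [rest.pop(0)]
--     s = subnet
--     while s > 8 and len(net) < 4:
--         net.insert(0, rest.pop(0))
--         s -= 8
--     name = '.'.join(reversed(rest))
--     tail = '.'.join(net[1:] + ['in-addr.arpa'])
--     rem = subnet % 8
--     if rem == 0:
--         return [{'reverse_net': net[0] + '.' + tail, 'name': name}]
--
--     def gen(base, depth):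
--         if depth == 0:
--             return [{'reverse_net': '{}.{}'.format(base, tail), 'name': name}]
--         return gen(base, depth - 1) + gen(base + 2 ** (depth - 1), depth - 1)
--
--     return gen(int(net[0]), 8 - rem)
-- ===== Notes on version B (the rewrite author's own statement) =====
-- stated objective: alternative
-- what changed: B replaces A's four-branch threshold cascade by a while loop that peels octets from the address into the net while subtracting 8 from the prefix, and replaces A's counted linear loop (with its halving loop computing the record count) by a divide-and-conquer recursion gen(base, depth) that emits the 2^depth zone records by binary range splitting.
import Mathlib
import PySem

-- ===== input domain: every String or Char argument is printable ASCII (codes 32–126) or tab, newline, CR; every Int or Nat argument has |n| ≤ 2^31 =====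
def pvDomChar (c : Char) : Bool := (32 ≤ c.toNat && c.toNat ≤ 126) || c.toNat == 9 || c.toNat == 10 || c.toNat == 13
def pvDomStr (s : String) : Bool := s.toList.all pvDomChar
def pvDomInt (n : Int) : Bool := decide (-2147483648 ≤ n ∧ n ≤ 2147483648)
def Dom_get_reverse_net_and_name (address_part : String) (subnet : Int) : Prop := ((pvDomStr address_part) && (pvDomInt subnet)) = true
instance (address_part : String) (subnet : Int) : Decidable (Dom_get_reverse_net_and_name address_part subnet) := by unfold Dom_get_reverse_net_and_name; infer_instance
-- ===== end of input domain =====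

-- B replaces A's if/elif threshold cascade by a while loop peeling octets into the net,
-- and A's counted record loop (count from a halving loop) by a divide-and-conquer
-- recursion that emits the zone records by binary range splitting; same return value on Pre_.


-- ===== PORT A =====
-- literal transliteration of A; strings are handled as List Char (PySem.Chars) and packed
-- with String.ofList only at the very end
-- shared code after the if/elif cascade (from "if divmod(subnet, 8)[1] == 0:" on),
-- with the branch's reverse_net and name in scope
def pvFinishA (subnet : Int) (reverse_net name : List Char) : List (List (String × String)) :=
  if PySem.Int.mod subnet 8 = 0 then
    [[("reverse_net", String.ofList reverse_net), ("name", String.ofList name)]]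
  else
    -- zone_number/number_of_div halving loop, state (zone_number, number_of_div);
    -- int(zone_number / 2) is PySem.Int.truncdiv (exact: zone_number is a power of two < 2^53,
    -- so Python's float division is exact and int() truncates)
    let zone_number := ((PySem.List.pyRange 1 (PySem.Int.mod subnet 8) 1).foldl
      (fun (st : Int × Int) _ =>
        if st.2 ≠ PySem.Int.mod subnet 8 then (PySem.Int.truncdiv st.1 2, st.2 + 1) else st)
      (128, 1)).1
    (PySem.List.pyRange 0 zone_number 1).foldl
      (fun acc i =>
        match PySem.Int.ofChars? ((PySem.Chars.splitOnMax reverse_net ['.'] 1).getD 0 []) with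
        | some zi0 =>
          acc ++ [[("reverse_net",
                    String.ofList (PySem.Int.toChars (zi0 + i) ++ '.' ::
                      (PySem.Chars.splitOnMax reverse_net ['.'] 1).getD 1 [])),
                   ("name", String.ofList name)]]
        | none => []  -- ValueError from int(...): excluded by Pre_
      ) []

def get_reverse_net_and_name (address_part : String) (subnet : Int) : List (List (String × String)) :=
  let parts := PySem.Chars.splitOnMax address_part.toList ['.'] 4
  match parts with
  | p1 :: p2 :: p3 :: p4 :: _ =>
    let arpa := "in-addr.arpa".toList
    if subnet ≤ 8 then pvFinishA subnet (p1 ++ '.' :: arpa) (p4 ++ '.' :: p3 ++ '.' :: p2)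
    else if subnet ≤ 16 then pvFinishA subnet (p2 ++ '.' :: (p1 ++ '.' :: arpa)) (p4 ++ '.' :: p3)
    else if subnet ≤ 24 then pvFinishA subnet (p3 ++ '.' :: (p2 ++ '.' :: p1 ++ '.' :: arpa)) p4
    else pvFinishA subnet (p4 ++ '.' :: (p3 ++ '.' :: p2 ++ '.' :: p1 ++ '.' :: arpa)) []
  | _ => []  -- IndexError: fewer than 4 dot-separated parts, excluded by Pre_

-- ===== PORT B =====
-- the while loop "while s > 8 and len(net) < 4: net.insert(0, rest.pop(0)); s -= 8",
-- structural recursion on rest (rest shrinks each iteration; an empty rest with the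
-- condition still true is Python's IndexError, excluded by Pre_)
def pvPeel (s : Int) (net : List (List Char)) :
    List (List Char) → List (List Char) × List (List Char) × Int
  | [] => (net, [], s)
  | r :: rs =>
    if 8 < s ∧ net.length < 4 then pvPeel (s - 8) (r :: net) rs else (net, r :: rs, s)

-- gen(base, depth): divide-and-conquer emission of the 2^depth records
def pvGenB (tail name : List Char) : Int → Nat → List (List (String × String))
  | base, 0 => [[("reverse_net", String.ofList (PySem.Int.toChars base ++ '.' :: tail)),
                 ("name", String.ofList name)]]
  | base, d + 1 => pvGenB tail name base d ++ pvGenB tail name (base + 2 ^ d) d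

def get_reverse_net_and_name_alt (address_part : String) (subnet : Int) : List (List (String × String)) :=
  match (PySem.Chars.splitOnMax address_part.toList ['.'] 4).take 4 with
  | [] => []  -- rest.pop(0) on an empty list: IndexError, excluded by Pre_
  | p1 :: rest1 =>
    let pn := pvPeel subnet [p1] rest1
    let net := pn.1
    let rest := pn.2.1
    let name := PySem.Chars.join ['.'] rest.reverse
    let tail := PySem.Chars.join ['.'] (net.drop 1 ++ ["in-addr.arpa".toList])
    if PySem.Int.mod subnet 8 = 0 then
      [[("reverse_net", String.ofList (net.headD [] ++ '.' :: tail)),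
        ("name", String.ofList name)]]
    else
      match PySem.Int.ofChars? (net.headD []) with
      | some base => pvGenB tail name base (8 - PySem.Int.mod subnet 8).toNat
      | none => []  -- ValueError from int(...): excluded by Pre_

-- ===== PRECONDITION & SPEC =====
-- which octet A feeds to int(...) (the first component of reverse_net), as an index
def pvOctetIdx (subnet : Int) : Nat :=
  if subnet ≤ 8 then 0 else if subnet ≤ 16 then 1 else if subnet ≤ 24 then 2 else 3

-- A raises IndexError when address_part has fewer than 4 dot-separated parts, and ValueError
-- when subnet % 8 ≠ 0 and the leading octet of reverse_net does not parse as an int.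
def Pre_get_reverse_net_and_name (address_part : String) (subnet : Int) : Prop :=
  4 ≤ (PySem.Chars.splitOnMax address_part.toList ['.'] 4).length ∧
  (PySem.Int.mod subnet 8 ≠ 0 →
    (PySem.Int.ofChars?
      ((PySem.Chars.splitOnMax address_part.toList ['.'] 4).getD (pvOctetIdx subnet) [])).isSome = true)
instance (address_part : String) (subnet : Int) : Decidable (Pre_get_reverse_net_and_name address_part subnet) := by unfold Pre_get_reverse_net_and_name; infer_instance

def pvWitness_get_reverse_net_and_name : String × Int := ("192.168.3.10", 20)

def Spec_get_reverse_net_and_name (address_part : String) (subnet : Int) (out : List (List (String × String))) : Prop := out = get_reverse_net_and_name_alt address_part subnet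
instance (address_part : String) (subnet : Int) (out : List (List (String × String))) : Decidable (Spec_get_reverse_net_and_name address_part subnet out) := by unfold Spec_get_reverse_net_and_name; infer_instance

-- ===== CLAIM (what is proved, stated in full; the proofs are below) =====
def Claim_equal_get_reverse_net_and_name : Prop := ∀ (address_part : String) (subnet : Int), Dom_get_reverse_net_and_name address_part subnet → Pre_get_reverse_net_and_name address_part subnet → Spec_get_reverse_net_and_name address_part subnet (get_reverse_net_and_name address_part subnet)

-- ===== LEMMAS AND PROOFS =====
lemma go_nonsep (c : Char) (hc : c ≠ '.') (l cur : List Char) (acc : List (List Char)) (fuel m : Nat) (hm : m ≠ 0) :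
    PySem.Chars.splitOnMax.go ['.'] (fuel+1) m (c::l) cur acc
      = PySem.Chars.splitOnMax.go ['.'] fuel m l (c::cur) acc := by
  simp [PySem.Chars.splitOnMax.go, List.isPrefixOf, hm, Ne.symm hc]

lemma go_sep (l cur : List Char) (acc : List (List Char)) (fuel m : Nat) (hm : m ≠ 0) :
    PySem.Chars.splitOnMax.go ['.'] (fuel+1) m ('.'::l) cur acc
      = PySem.Chars.splitOnMax.go ['.'] fuel (m-1) l [] (cur.reverse :: acc) := by
  simp [PySem.Chars.splitOnMax.go, List.isPrefixOf, hm]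

lemma go_mzero (l cur : List Char) (acc : List (List Char)) (fuel : Nat) :
    PySem.Chars.splitOnMax.go ['.'] fuel 0 l cur acc = ((cur.reverse ++ l) :: acc).reverse := by
  cases fuel <;> cases l <;> simp [PySem.Chars.splitOnMax.go]

lemma go_nil (cur : List Char) (acc : List (List Char)) (fuel : Nat) :
    PySem.Chars.splitOnMax.go ['.'] (fuel+1) (m+1) [] cur acc = (cur.reverse :: acc).reverse := by
  simp [PySem.Chars.splitOnMax.go]

lemma go_split1 (x y : List Char) (acc : List (List Char)) (hx : ('.':Char) ∉ x) (cur : List Char) (fuel : Nat)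
    (hf : x.length < fuel) :
    PySem.Chars.splitOnMax.go ['.'] fuel 1 (x ++ '.'::y) cur acc
      = acc.reverse ++ [cur.reverse ++ x, y] := by
  induction x generalizing fuel cur with
  | nil =>
    cases fuel with
    | zero => omega
    | succ f => rw [List.nil_append, go_sep _ _ _ _ _ (by omega), go_mzero]; simp
  | cons c t ih =>
    cases fuel with
    | zero => simp at hf
    | succ f =>
      have hc : c ≠ '.' := by intro h; exact hx (h ▸ List.mem_cons_self)
      rw [List.cons_append, go_nonsep c hc _ _ _ _ _ (by omega),
        ih (fun h => hx (List.mem_cons_of_mem _ h)) (c::cur) f (by simpa using hf)]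
      simp

lemma go_pieces (l : List Char) : ∀ (fuel m : Nat) (cur : List Char) (acc : List (List Char)),
    l.length < fuel → (∀ a ∈ acc, ('.':Char) ∉ a) → ('.':Char) ∉ cur →
    (∀ p ∈ (PySem.Chars.splitOnMax.go ['.'] fuel m l cur acc).dropLast, ('.':Char) ∉ p) ∧
    ((PySem.Chars.splitOnMax.go ['.'] fuel m l cur acc).length ≤ acc.length + m →
      ∀ p ∈ PySem.Chars.splitOnMax.go ['.'] fuel m l cur acc, ('.':Char) ∉ p) := by
  induction l with
  | nil =>
    intro fuel m cur acc hf hacc hcur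
    cases fuel with
    | zero => omega
    | succ f =>
      cases m with
      | zero =>
        rw [go_mzero]
        constructor
        · intro p hp
          rw [show ((cur.reverse ++ []) :: acc).reverse = acc.reverse ++ [cur.reverse ++ []] by simp,
            List.dropLast_concat] at hp
          exact hacc _ (List.mem_reverse.1 hp)
        · intro _ p hp
          rw [show ((cur.reverse ++ []) :: acc).reverse = acc.reverse ++ [cur.reverse ++ []] by simp] at hp
          rcases List.mem_append.1 hp with h | h
          · exact hacc _ (List.mem_reverse.1 h)
          · simp at h; subst h; simpa using hcur
      | succ m' =>
        rw [go_nil]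
        constructor
        · intro p hp
          rw [show (cur.reverse :: acc).reverse = acc.reverse ++ [cur.reverse] by simp,
            List.dropLast_concat] at hp
          exact hacc _ (List.mem_reverse.1 hp)
        · intro _ p hp
          rw [show (cur.reverse :: acc).reverse = acc.reverse ++ [cur.reverse] by simp] at hp
          rcases List.mem_append.1 hp with h | h
          · exact hacc _ (List.mem_reverse.1 h)
          · simp at h; subst h; simpa using hcur
  | cons c t ih =>
    intro fuel m cur acc hf hacc hcur
    cases fuel with
    | zero => omega
    | succ f =>
      cases m with
      | zero =>
        rw [go_mzero]
        constructor
        · intro p hp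
          rw [show ((cur.reverse ++ c::t) :: acc).reverse = acc.reverse ++ [cur.reverse ++ c::t] by simp,
            List.dropLast_concat] at hp
          exact hacc _ (List.mem_reverse.1 hp)
        · intro hlen
          exfalso
          rw [show ((cur.reverse ++ c::t) :: acc).reverse = acc.reverse ++ [cur.reverse ++ c::t] by simp] at hlen
          simp at hlen
      | succ m' =>
        by_cases hc : c = '.'
        · subst hc
          rw [go_sep _ _ _ _ _ (by omega)]
          simp only [Nat.add_sub_cancel]
          have := ih f m' [] (cur.reverse :: acc)
            (by simp at hf; omega)
            (by intro a ha; rcases List.mem_cons.1 ha with h | h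
                · subst h; intro hx; exact hcur (List.mem_reverse.1 hx)
                · exact hacc _ h)
            (by simp)
          exact ⟨this.1, fun hl => this.2 (by simp only [List.length_cons]; omega)⟩
        · rw [go_nonsep c hc _ _ _ _ _ (by omega)]
          exact ih f (m'+1) (c::cur) acc (by simp at hf; omega) hacc
            (by intro hx; rcases List.mem_cons.1 hx with h | h
                · exact hc h.symm
                · exact hcur h)

lemma splitOnMax_eq_go (s : List Char) (m : Nat) :
    PySem.Chars.splitOnMax s ['.'] (m : Int) = PySem.Chars.splitOnMax.go ['.'] (s.length + 1) m s [] [] := by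
  simp [PySem.Chars.splitOnMax]

lemma parts_dotfree (s p1 p2 p3 p4 : List Char) (t : List (List Char))
    (h : PySem.Chars.splitOnMax s ['.'] 4 = p1::p2::p3::p4::t) :
    ∀ x ∈ [p1,p2,p3,p4], ('.':Char) ∉ x := by
  rw [show (4 : Int) = ((4:Nat) : Int) by norm_num, splitOnMax_eq_go] at h
  have hp := go_pieces s (s.length+1) 4 [] [] (by omega) (by simp) (by simp)
  rw [h] at hp
  cases t with
  | nil =>
    intro x hx
    have := hp.2 (by simp)
    simp at hx
    rcases hx with h|h|h|h <;> subst h <;> exact this _ (by simp)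
  | cons e t' =>
    intro x hx
    have := hp.1
    simp at hx
    rcases hx with h|h|h|h <;> subst h <;> exact this _ (by simp [List.dropLast])

lemma split1_eq (x y : List Char) (hx : ('.':Char) ∉ x) :
    PySem.Chars.splitOnMax (x ++ '.'::y) ['.'] 1 = [x, y] := by
  rw [show (1 : Int) = ((1:Nat) : Int) by norm_num, splitOnMax_eq_go,
    go_split1 x y [] hx [] _ (by simp)]
  simp

lemma zone_closed (r : Int) (h1 : 1 ≤ r) (h7 : r ≤ 7) :
    ((PySem.List.pyRange 1 r 1).foldl
      (fun (st : Int × Int) _ =>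
        if st.2 ≠ r then (PySem.Int.truncdiv st.1 2, st.2 + 1) else st)
      (128, 1)).1 = 2 ^ (8 - r).toNat := by
  have : r = 1 ∨ r = 2 ∨ r = 3 ∨ r = 4 ∨ r = 5 ∨ r = 6 ∨ r = 7 := by omega
  rcases this with h|h|h|h|h|h|h <;> subst h <;> decide

-- the divide-and-conquer emission enumerates exactly base .. base + 2^d - 1 in order
lemma genB_eq (tail name : List Char) (d : Nat) : ∀ (base : Int),
    pvGenB tail name base d = (PySem.List.pyRange 0 ((2:Int)^d) 1).map
      (fun i => [("reverse_net", String.ofList (PySem.Int.toChars (base + i) ++ '.' :: tail)),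
                 ("name", String.ofList name)]) := by
  induction d with
  | zero =>
    intro base
    simp [pvGenB, pow_zero, PySem.List.pyRange_one]
  | succ d ih =>
    intro base
    have hpos : (0:Int) < 2 ^ d := by positivity
    rw [show ((2:Int)^(d+1)) = 2^d + 2^d by ring,
      PySem.List.pyRange_one_append 0 (2^d) (2^d + 2^d) (by omega) (by omega),
      List.map_append]
    simp only [pvGenB]
    rw [ih base, ih (base + 2^d)]
    congr 1
    rw [PySem.List.pyRange_one, PySem.List.pyRange_one]
    rw [show ((2:Int)^d + 2^d - 2^d) = 2^d by ring]
    simp only [List.map_map, sub_zero]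
    refine List.map_congr_left fun k _ => ?_
    simp only [Function.comp]
    rw [show base + 2^d + ((0:Int) + (k:Int)) = base + ((2:Int)^d + (k:Int)) by ring]

lemma main_core (x y nm : List Char) (s : Int) (hx : ('.':Char) ∉ x)
    (hps : PySem.Int.mod s 8 ≠ 0 → (PySem.Int.ofChars? x).isSome = true) :
    pvFinishA s (x ++ '.' :: y) nm =
    (if PySem.Int.mod s 8 = 0 then
      [[("reverse_net", String.ofList (x ++ '.' :: y)), ("name", String.ofList nm)]]
    else
      match PySem.Int.ofChars? x with
      | some base => pvGenB y nm base (8 - PySem.Int.mod s 8).toNat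
      | none => []) := by
  have hmb : 0 ≤ PySem.Int.mod s 8 := PySem.Int.mod_nonneg s (by norm_num)
  have hml : PySem.Int.mod s 8 < 8 := PySem.Int.mod_lt s (by norm_num)
  unfold pvFinishA
  by_cases hr : PySem.Int.mod s 8 = 0
  · rw [if_pos hr, if_pos hr]
  · rw [if_neg hr, if_neg hr]
    obtain ⟨z, hz⟩ := Option.isSome_iff_exists.1 (hps hr)
    rw [zone_closed (PySem.Int.mod s 8) (by omega) (by omega)]
    simp only [split1_eq x y hx, List.getD_cons_zero, List.getD_cons_succ, hz]
    rw [PySem.List.foldl_append_singleton_eq_map, genB_eq]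
    simp

-- ===== VERDICT (by name: the statement is the Claim_ definition above) =====
theorem get_reverse_net_and_name_spec : Claim_equal_get_reverse_net_and_name := by
  intro a s hdom hpre
  unfold Spec_get_reverse_net_and_name get_reverse_net_and_name get_reverse_net_and_name_alt
  obtain ⟨hlen, hparse⟩ := hpre
  generalize hP : PySem.Chars.splitOnMax a.toList ['.'] 4 = parts at *
  rcases parts with _|⟨p1,_|⟨p2,_|⟨p3,_|⟨p4,t⟩⟩⟩⟩
  · simp at hlen
  · simp at hlen
  · simp at hlen
  · simp at hlen
  have hdf := parts_dotfree a.toList p1 p2 p3 p4 t hP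
  have htake : (p1::p2::p3::p4::t).take 4 = [p1,p2,p3,p4] := by
    simp [List.take]
  rw [htake]
  dsimp only
  by_cases h8 : s ≤ 8
  · have hpeel : pvPeel s [p1] [p2,p3,p4] = ([p1],[p2,p3,p4],s) := by
      unfold pvPeel
      rw [if_neg (by rintro ⟨h1,_⟩; omega)]
    rw [if_pos h8, hpeel]
    have htail : PySem.Chars.join ['.'] (([p1] : List (List Char)).drop 1 ++ ["in-addr.arpa".toList])
        = "in-addr.arpa".toList := by
      simp [PySem.Chars.join_singleton]
    have hname : PySem.Chars.join ['.'] ([p2,p3,p4] : List (List Char)).reverse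
        = p4 ++ '.' :: p3 ++ '.' :: p2 := by
      simp [PySem.Chars.join_singleton, PySem.Chars.join_cons_cons]
    dsimp only
    rw [htail, hname]
    exact main_core p1 ("in-addr.arpa".toList) (p4 ++ '.' :: p3 ++ '.' :: p2) s
      (hdf p1 (by simp))
      (fun hr => by simpa [pvOctetIdx, h8] using hparse hr)
  by_cases h16 : s ≤ 16
  · have hpeel : pvPeel s [p1] [p2,p3,p4] = ([p2,p1],[p3,p4],s-8) := by
      unfold pvPeel
      rw [if_pos ⟨by omega, by simp⟩]
      unfold pvPeel
      rw [if_neg (by rintro ⟨h1,_⟩; omega)]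
    rw [if_neg h8, if_pos h16, hpeel]
    have htail : PySem.Chars.join ['.'] (([p2,p1] : List (List Char)).drop 1 ++ ["in-addr.arpa".toList])
        = p1 ++ '.' :: "in-addr.arpa".toList := by
      simp [PySem.Chars.join_singleton, PySem.Chars.join_cons_cons]
    have hname : PySem.Chars.join ['.'] ([p3,p4] : List (List Char)).reverse
        = p4 ++ '.' :: p3 := by
      simp [PySem.Chars.join_singleton, PySem.Chars.join_cons_cons]
    dsimp only
    rw [htail, hname]
    exact main_core p2 (p1 ++ '.' :: "in-addr.arpa".toList) (p4 ++ '.' :: p3) s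
      (hdf p2 (by simp))
      (fun hr => by simpa [pvOctetIdx, h8, h16] using hparse hr)
  by_cases h24 : s ≤ 24
  · have hpeel : pvPeel s [p1] [p2,p3,p4] = ([p3,p2,p1],[p4],s-16) := by
      unfold pvPeel
      rw [if_pos ⟨by omega, by simp⟩]
      unfold pvPeel
      rw [if_pos ⟨by omega, by simp⟩]
      unfold pvPeel
      rw [if_neg (by rintro ⟨h1,_⟩; omega)]
      norm_num
      omega
    rw [if_neg h8, if_neg h16, if_pos h24, hpeel]
    have htail : PySem.Chars.join ['.'] (([p3,p2,p1] : List (List Char)).drop 1 ++ ["in-addr.arpa".toList])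
        = p2 ++ '.' :: p1 ++ '.' :: "in-addr.arpa".toList := by
      simp [PySem.Chars.join_singleton, PySem.Chars.join_cons_cons]
    have hname : PySem.Chars.join ['.'] ([p4] : List (List Char)).reverse = p4 := by
      simp [PySem.Chars.join_singleton]
    dsimp only
    rw [htail, hname]
    exact main_core p3 (p2 ++ '.' :: p1 ++ '.' :: "in-addr.arpa".toList) p4 s
      (hdf p3 (by simp))
      (fun hr => by simpa [pvOctetIdx, h8, h16, h24] using hparse hr)
  · have hpeel : pvPeel s [p1] [p2,p3,p4] = ([p4,p3,p2,p1],[],s-24) := by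
      unfold pvPeel
      rw [if_pos ⟨by omega, by simp⟩]
      unfold pvPeel
      rw [if_pos ⟨by omega, by simp⟩]
      unfold pvPeel
      rw [if_pos ⟨by omega, by simp⟩]
      unfold pvPeel
      norm_num
      omega
    rw [if_neg h8, if_neg h16, if_neg h24, hpeel]
    have htail : PySem.Chars.join ['.'] (([p4,p3,p2,p1] : List (List Char)).drop 1 ++ ["in-addr.arpa".toList])
        = p3 ++ '.' :: p2 ++ '.' :: p1 ++ '.' :: "in-addr.arpa".toList := by
      simp [PySem.Chars.join_singleton, PySem.Chars.join_cons_cons]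
    have hname : PySem.Chars.join ['.'] (([] : List (List Char))).reverse = ([] : List Char) := by
      simp [PySem.Chars.join_nil]
    dsimp only
    rw [htail, hname]
    exact main_core p4 (p3 ++ '.' :: p2 ++ '.' :: p1 ++ '.' :: "in-addr.arpa".toList) ([] : List Char) s
      (hdf p4 (by simp))
      (fun hr => by simpa [pvOctetIdx, h8, h16, h24] using hparse hr)
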